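-- pv_equiv track=rewrite | github.com/Yyds2606969228/keil2Cmake | src/keil2cmake/compiler/debug.py | infer_openocd_target
-- ===== SOURCE A (Python) =====
-- def infer_openocd_target(device: str) -> str:
--     if not device:
--         return ""
--     dev = str(device).strip().lower()
--     patterns = [
--         ("stm32f0", "target/stm32f0x.cfg"),
--         ("stm32f1", "target/stm32f1x.cfg"),
--         ("stm32f2", "target/stm32f2x.cfg"),
--         ("stm32f3", "target/stm32f3x.cfg"),
--         ("stm32f4", "target/stm32f4x.cfg"),
--         ("stm32f7", "target/stm32f7x.cfg"),
--         ("stm32g0", "target/stm32g0x.cfg"),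
--         ("stm32g4", "target/stm32g4x.cfg"),
--         ("stm32h7", "target/stm32h7x.cfg"),
--         ("stm32l0", "target/stm32l0.cfg"),
--         ("stm32l1", "target/stm32l1.cfg"),
--         ("stm32l4", "target/stm32l4x.cfg"),
--         ("stm32wb", "target/stm32wbx.cfg"),
--         ("stm32wl", "target/stm32wlx.cfg"),
--         ("nrf51", "target/nrf51.cfg"),
--         ("nrf52", "target/nrf52.cfg"),
--         ("lpc17", "target/lpc17xx.cfg"),
--         ("lpc54", "target/lpc54xxx.cfg"),
--     ]
--     for prefix, target in patterns:
--         if dev.startswith(prefix):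
--             return target
--     return ""
-- ===== SOURCE B (Python) =====
-- _STM32_X_SERIES = frozenset(
--     {"f0", "f1", "f2", "f3", "f4", "f7", "g0", "g4", "h7", "l4", "wb", "wl"}
-- )
--
--
-- def infer_openocd_target(device: str) -> str:
--     if not device:
--         return ""
--     dev = str(device).strip().lower()
--     if dev.startswith("stm32"):
--         series = dev[5:7]
--         if series in _STM32_X_SERIES:
--             return "target/stm32" + series + "x.cfg"
--         if series in ("l0", "l1"):
--             return "target/stm32" + series + ".cfg"
--         return ""
--     if dev.startswith("nrf5"):
--         digit = dev[4:5]
--         if digit in ("1", "2"):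
--             return "target/nrf5" + digit + ".cfg"
--         return ""
--     if dev.startswith("lpc"):
--         pair = dev[3:5]
--         if pair == "17":
--             return "target/lpc17xx.cfg"
--         if pair == "54":
--             return "target/lpc54xxx.cfg"
--         return ""
--     return ""
-- ===== Notes on version B (the rewrite author's own statement) =====
-- stated objective: alternative
-- what changed: Replaces the 18-pattern startswith scan and its table by a three-way family decision tree (stm32 / nrf5 / lpc) that slices out the series characters once and synthesizes the config path by concatenation, keeping only a 12-element series set instead of the full prefix->path table.
import Mathlib
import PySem

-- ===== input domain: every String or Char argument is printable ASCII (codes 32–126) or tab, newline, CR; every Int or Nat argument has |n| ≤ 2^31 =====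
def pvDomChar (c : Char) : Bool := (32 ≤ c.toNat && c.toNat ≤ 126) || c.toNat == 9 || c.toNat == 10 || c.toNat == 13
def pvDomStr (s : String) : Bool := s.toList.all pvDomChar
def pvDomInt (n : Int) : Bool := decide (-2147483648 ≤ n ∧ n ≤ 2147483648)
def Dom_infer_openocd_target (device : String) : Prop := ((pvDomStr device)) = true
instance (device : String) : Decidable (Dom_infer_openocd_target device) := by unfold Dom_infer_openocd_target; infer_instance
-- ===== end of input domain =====

-- B replaces A's 18-pattern startswith scan by a three-way family decision tree
-- (stm32 / nrf5 / lpc) that slices the series characters out once and synthesizes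
-- the config path by concatenation; same return value on every input.

-- ===== PORT A =====
def patternsA : List (String × String) :=
  [("stm32f0", "target/stm32f0x.cfg"),
   ("stm32f1", "target/stm32f1x.cfg"),
   ("stm32f2", "target/stm32f2x.cfg"),
   ("stm32f3", "target/stm32f3x.cfg"),
   ("stm32f4", "target/stm32f4x.cfg"),
   ("stm32f7", "target/stm32f7x.cfg"),
   ("stm32g0", "target/stm32g0x.cfg"),
   ("stm32g4", "target/stm32g4x.cfg"),
   ("stm32h7", "target/stm32h7x.cfg"),
   ("stm32l0", "target/stm32l0.cfg"),
   ("stm32l1", "target/stm32l1.cfg"),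
   ("stm32l4", "target/stm32l4x.cfg"),
   ("stm32wb", "target/stm32wbx.cfg"),
   ("stm32wl", "target/stm32wlx.cfg"),
   ("nrf51", "target/nrf51.cfg"),
   ("nrf52", "target/nrf52.cfg"),
   ("lpc17", "target/lpc17xx.cfg"),
   ("lpc54", "target/lpc54xxx.cfg")]

def loopA (dev : String) : List (String × String) → String
  | [] => ""
  | (p, t) :: rest => if PySem.Str.startswith dev p then t else loopA dev rest

def infer_openocd_target (device : String) : String :=
  if device = "" then ""
  else loopA (PySem.Str.lower (PySem.Str.strip device)) patternsA

-- ===== PORT B =====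
-- the STM32 series whose config file carries an 'x' after the series letters
def stm32xSeries : PySem.Set String :=
  PySem.Set.ofList ["f0", "f1", "f2", "f3", "f4", "f7", "g0", "g4", "h7", "l4", "wb", "wl"]

-- Python string '+' is ported exactly as String.ofList of the concatenated char lists
def treeB (dev : String) : String :=
  if PySem.Str.startswith dev "stm32" then
    if PySem.Set.contains stm32xSeries (PySem.Str.slice dev (some 5) (some 7)) then
      String.ofList ("target/stm32".toList ++ (PySem.Str.slice dev (some 5) (some 7)).toList ++ "x.cfg".toList)
    else if PySem.Str.slice dev (some 5) (some 7) = "l0" ∨ PySem.Str.slice dev (some 5) (some 7) = "l1" then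
      String.ofList ("target/stm32".toList ++ (PySem.Str.slice dev (some 5) (some 7)).toList ++ ".cfg".toList)
    else ""
  else if PySem.Str.startswith dev "nrf5" then
    if PySem.Str.slice dev (some 4) (some 5) = "1" ∨ PySem.Str.slice dev (some 4) (some 5) = "2" then
      String.ofList ("target/nrf5".toList ++ (PySem.Str.slice dev (some 4) (some 5)).toList ++ ".cfg".toList)
    else ""
  else if PySem.Str.startswith dev "lpc" then
    if PySem.Str.slice dev (some 3) (some 5) = "17" then "target/lpc17xx.cfg"
    else if PySem.Str.slice dev (some 3) (some 5) = "54" then "target/lpc54xxx.cfg"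
    else ""
  else ""

def infer_openocd_target_alt (device : String) : String :=
  if device = "" then ""
  else treeB (PySem.Str.lower (PySem.Str.strip device))

-- ===== PRECONDITION & SPEC =====
def Spec_infer_openocd_target (device : String) (out : String) : Prop := out = infer_openocd_target_alt device
instance (device : String) (out : String) : Decidable (Spec_infer_openocd_target device out) := by unfold Spec_infer_openocd_target; infer_instance

-- ===== CLAIM (what is proved, stated in full; the proofs are below) =====
def Claim_equal_infer_openocd_target : Prop := ∀ (device : String), Dom_infer_openocd_target device → Spec_infer_openocd_target device (infer_openocd_target device)

-- ===== LEMMAS AND PROOFS =====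

lemma startswith_prefix {s p : String} (h : PySem.Str.startswith s p = true) :
    p.toList <+: s.toList := by
  rw [PySem.Str.startswith_eq] at h
  exact (PySem.Chars.startswith_iff _ _).mp h

lemma startswith_true {s p : String} (h : p.toList <+: s.toList) :
    PySem.Str.startswith s p = true := by
  simp only [PySem.Str.startswith_eq]
  exact (PySem.Chars.startswith_iff _ _).mpr h

lemma startswith_false {s p : String} (h : ¬ p.toList <+: s.toList) :
    PySem.Str.startswith s p = false := by
  simp only [PySem.Str.startswith_eq, Bool.eq_false_iff]
  exact fun hc => h ((PySem.Chars.startswith_iff _ _).mp hc)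

lemma pref_ext {l p : List Char} (h : p <+: l) (q : List Char) :
    ((p ++ q) <+: l) ↔ (l.drop p.length).take q.length = q := by
  obtain ⟨t, rfl⟩ := h
  rw [List.prefix_append_right_inj, List.drop_left]
  exact ⟨fun hq => (List.prefix_iff_eq_take.mp hq).symm,
         fun hq => List.prefix_iff_eq_take.mpr hq.symm⟩

lemma sliceTo (s : String) (a b : Nat) :
    (PySem.Str.slice s (some (a : Int)) (some (b : Int))).toList = (s.toList.drop a).take (b - a) := by
  rw [PySem.Str.toList_slice, PySem.Chars.slice_eq_listSlice, PySem.List.slice_natCast]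

lemma sw_iff (s p q pre : String) (la lb : Nat) (hp : pre.toList <+: s.toList)
    (hpat : p.toList = pre.toList ++ q.toList)
    (hla : pre.toList.length = la) (hlq : q.toList.length = lb - la) :
    PySem.Str.startswith s p = true ↔
      PySem.Str.slice s (some (la : Int)) (some (lb : Int)) = q := by
  constructor
  · intro h
    have hpre := startswith_prefix h
    rw [hpat] at hpre
    have ht := (pref_ext hp q.toList).mp hpre
    rw [hla, hlq] at ht
    apply String.toList_inj.mp
    rw [sliceTo, ht]
  · intro h
    apply startswith_true
    rw [hpat]
    apply (pref_ext hp q.toList).mpr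
    rw [hla, hlq, ← sliceTo, h]

lemma sw_false_of_ne (s p q pre : String) (la lb : Nat) (hp : pre.toList <+: s.toList)
    (hpat : p.toList = pre.toList ++ q.toList)
    (hla : pre.toList.length = la) (hlq : q.toList.length = lb - la)
    (hne : PySem.Str.slice s (some (la : Int)) (some (lb : Int)) ≠ q) :
    PySem.Str.startswith s p = false := by
  rw [Bool.eq_false_iff]
  intro h
  exact hne ((sw_iff s p q pre la lb hp hpat hla hlq).mp h)

lemma head_mismatch {l p q : List Char} (hp : p <+: l) (hq : q <+: l)
    (hpn : p ≠ []) (hqn : q ≠ []) : p.take 1 = q.take 1 := by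
  rw [List.prefix_iff_eq_take.mp hp, List.prefix_iff_eq_take.mp hq,
      List.take_take, List.take_take]
  have h1 : min 1 p.length = 1 := Nat.min_eq_left (List.length_pos_of_ne_nil hpn)
  have h2 : min 1 q.length = 1 := Nat.min_eq_left (List.length_pos_of_ne_nil hqn)
  rw [h1, h2]

lemma sw_head_false (s pre q : String) (hp : pre.toList <+: s.toList)
    (hpn : pre.toList ≠ []) (hqn : q.toList ≠ [])
    (hne : pre.toList.take 1 ≠ q.toList.take 1) :
    PySem.Str.startswith s q = false := by
  apply startswith_false
  intro hq
  exact hne (head_mismatch hp hq hpn hqn)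

lemma sw_ext_false (s p q : String) (hn : ¬ PySem.Str.startswith s p = true)
    (hpq : p.toList <+: q.toList) : PySem.Str.startswith s q = false := by
  apply startswith_false
  intro hq
  exact hn (startswith_true (hpq.trans hq))

lemma core_eq (s : String) : loopA s patternsA = treeB s := by
  by_cases hS : PySem.Str.startswith s "stm32" = true
  · have hp : "stm32".toList <+: s.toList := startswith_prefix hS
    by_cases e1 : PySem.Str.slice s (some 5) (some 7) = "f0"
    · have b1 := (sw_iff s "stm32f0" "f0" "stm32" 5 7 hp (by decide) (by decide) (by decide)).mpr e1
      simp only [loopA, patternsA, b1, if_true, if_false, Bool.false_eq_true, treeB, hS, e1]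
      decide
    by_cases e2 : PySem.Str.slice s (some 5) (some 7) = "f1"
    · have b1 := sw_false_of_ne s "stm32f0" "f0" "stm32" 5 7 hp (by decide) (by decide) (by decide) e1
      have b2 := (sw_iff s "stm32f1" "f1" "stm32" 5 7 hp (by decide) (by decide) (by decide)).mpr e2
      simp only [loopA, patternsA, b1, b2, if_true, if_false, Bool.false_eq_true, treeB, hS, e2]
      decide
    by_cases e3 : PySem.Str.slice s (some 5) (some 7) = "f2"
    · have b1 := sw_false_of_ne s "stm32f0" "f0" "stm32" 5 7 hp (by decide) (by decide) (by decide) e1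
      have b2 := sw_false_of_ne s "stm32f1" "f1" "stm32" 5 7 hp (by decide) (by decide) (by decide) e2
      have b3 := (sw_iff s "stm32f2" "f2" "stm32" 5 7 hp (by decide) (by decide) (by decide)).mpr e3
      simp only [loopA, patternsA, b1, b2, b3, if_true, if_false, Bool.false_eq_true, treeB, hS, e3]
      decide
    by_cases e4 : PySem.Str.slice s (some 5) (some 7) = "f3"
    · have b1 := sw_false_of_ne s "stm32f0" "f0" "stm32" 5 7 hp (by decide) (by decide) (by decide) e1
      have b2 := sw_false_of_ne s "stm32f1" "f1" "stm32" 5 7 hp (by decide) (by decide) (by decide) e2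
      have b3 := sw_false_of_ne s "stm32f2" "f2" "stm32" 5 7 hp (by decide) (by decide) (by decide) e3
      have b4 := (sw_iff s "stm32f3" "f3" "stm32" 5 7 hp (by decide) (by decide) (by decide)).mpr e4
      simp only [loopA, patternsA, b1, b2, b3, b4, if_true, if_false, Bool.false_eq_true, treeB, hS, e4]
      decide
    by_cases e5 : PySem.Str.slice s (some 5) (some 7) = "f4"
    · have b1 := sw_false_of_ne s "stm32f0" "f0" "stm32" 5 7 hp (by decide) (by decide) (by decide) e1
      have b2 := sw_false_of_ne s "stm32f1" "f1" "stm32" 5 7 hp (by decide) (by decide) (by decide) e2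
      have b3 := sw_false_of_ne s "stm32f2" "f2" "stm32" 5 7 hp (by decide) (by decide) (by decide) e3
      have b4 := sw_false_of_ne s "stm32f3" "f3" "stm32" 5 7 hp (by decide) (by decide) (by decide) e4
      have b5 := (sw_iff s "stm32f4" "f4" "stm32" 5 7 hp (by decide) (by decide) (by decide)).mpr e5
      simp only [loopA, patternsA, b1, b2, b3, b4, b5, if_true, if_false, Bool.false_eq_true, treeB, hS, e5]
      decide
    by_cases e6 : PySem.Str.slice s (some 5) (some 7) = "f7"
    · have b1 := sw_false_of_ne s "stm32f0" "f0" "stm32" 5 7 hp (by decide) (by decide) (by decide) e1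
      have b2 := sw_false_of_ne s "stm32f1" "f1" "stm32" 5 7 hp (by decide) (by decide) (by decide) e2
      have b3 := sw_false_of_ne s "stm32f2" "f2" "stm32" 5 7 hp (by decide) (by decide) (by decide) e3
      have b4 := sw_false_of_ne s "stm32f3" "f3" "stm32" 5 7 hp (by decide) (by decide) (by decide) e4
      have b5 := sw_false_of_ne s "stm32f4" "f4" "stm32" 5 7 hp (by decide) (by decide) (by decide) e5
      have b6 := (sw_iff s "stm32f7" "f7" "stm32" 5 7 hp (by decide) (by decide) (by decide)).mpr e6
      simp only [loopA, patternsA, b1, b2, b3, b4, b5, b6, if_true, if_false, Bool.false_eq_true, treeB, hS, e6]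
      decide
    by_cases e7 : PySem.Str.slice s (some 5) (some 7) = "g0"
    · have b1 := sw_false_of_ne s "stm32f0" "f0" "stm32" 5 7 hp (by decide) (by decide) (by decide) e1
      have b2 := sw_false_of_ne s "stm32f1" "f1" "stm32" 5 7 hp (by decide) (by decide) (by decide) e2
      have b3 := sw_false_of_ne s "stm32f2" "f2" "stm32" 5 7 hp (by decide) (by decide) (by decide) e3
      have b4 := sw_false_of_ne s "stm32f3" "f3" "stm32" 5 7 hp (by decide) (by decide) (by decide) e4
      have b5 := sw_false_of_ne s "stm32f4" "f4" "stm32" 5 7 hp (by decide) (by decide) (by decide) e5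
      have b6 := sw_false_of_ne s "stm32f7" "f7" "stm32" 5 7 hp (by decide) (by decide) (by decide) e6
      have b7 := (sw_iff s "stm32g0" "g0" "stm32" 5 7 hp (by decide) (by decide) (by decide)).mpr e7
      simp only [loopA, patternsA, b1, b2, b3, b4, b5, b6, b7, if_true, if_false, Bool.false_eq_true, treeB, hS, e7]
      decide
    by_cases e8 : PySem.Str.slice s (some 5) (some 7) = "g4"
    · have b1 := sw_false_of_ne s "stm32f0" "f0" "stm32" 5 7 hp (by decide) (by decide) (by decide) e1
      have b2 := sw_false_of_ne s "stm32f1" "f1" "stm32" 5 7 hp (by decide) (by decide) (by decide) e2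
      have b3 := sw_false_of_ne s "stm32f2" "f2" "stm32" 5 7 hp (by decide) (by decide) (by decide) e3
      have b4 := sw_false_of_ne s "stm32f3" "f3" "stm32" 5 7 hp (by decide) (by decide) (by decide) e4
      have b5 := sw_false_of_ne s "stm32f4" "f4" "stm32" 5 7 hp (by decide) (by decide) (by decide) e5
      have b6 := sw_false_of_ne s "stm32f7" "f7" "stm32" 5 7 hp (by decide) (by decide) (by decide) e6
      have b7 := sw_false_of_ne s "stm32g0" "g0" "stm32" 5 7 hp (by decide) (by decide) (by decide) e7
      have b8 := (sw_iff s "stm32g4" "g4" "stm32" 5 7 hp (by decide) (by decide) (by decide)).mpr e8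
      simp only [loopA, patternsA, b1, b2, b3, b4, b5, b6, b7, b8, if_true, if_false, Bool.false_eq_true, treeB, hS, e8]
      decide
    by_cases e9 : PySem.Str.slice s (some 5) (some 7) = "h7"
    · have b1 := sw_false_of_ne s "stm32f0" "f0" "stm32" 5 7 hp (by decide) (by decide) (by decide) e1
      have b2 := sw_false_of_ne s "stm32f1" "f1" "stm32" 5 7 hp (by decide) (by decide) (by decide) e2
      have b3 := sw_false_of_ne s "stm32f2" "f2" "stm32" 5 7 hp (by decide) (by decide) (by decide) e3
      have b4 := sw_false_of_ne s "stm32f3" "f3" "stm32" 5 7 hp (by decide) (by decide) (by decide) e4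
      have b5 := sw_false_of_ne s "stm32f4" "f4" "stm32" 5 7 hp (by decide) (by decide) (by decide) e5
      have b6 := sw_false_of_ne s "stm32f7" "f7" "stm32" 5 7 hp (by decide) (by decide) (by decide) e6
      have b7 := sw_false_of_ne s "stm32g0" "g0" "stm32" 5 7 hp (by decide) (by decide) (by decide) e7
      have b8 := sw_false_of_ne s "stm32g4" "g4" "stm32" 5 7 hp (by decide) (by decide) (by decide) e8
      have b9 := (sw_iff s "stm32h7" "h7" "stm32" 5 7 hp (by decide) (by decide) (by decide)).mpr e9
      simp only [loopA, patternsA, b1, b2, b3, b4, b5, b6, b7, b8, b9, if_true, if_false, Bool.false_eq_true, treeB, hS, e9]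
      decide
    by_cases e10 : PySem.Str.slice s (some 5) (some 7) = "l0"
    · have b1 := sw_false_of_ne s "stm32f0" "f0" "stm32" 5 7 hp (by decide) (by decide) (by decide) e1
      have b2 := sw_false_of_ne s "stm32f1" "f1" "stm32" 5 7 hp (by decide) (by decide) (by decide) e2
      have b3 := sw_false_of_ne s "stm32f2" "f2" "stm32" 5 7 hp (by decide) (by decide) (by decide) e3
      have b4 := sw_false_of_ne s "stm32f3" "f3" "stm32" 5 7 hp (by decide) (by decide) (by decide) e4
      have b5 := sw_false_of_ne s "stm32f4" "f4" "stm32" 5 7 hp (by decide) (by decide) (by decide) e5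
      have b6 := sw_false_of_ne s "stm32f7" "f7" "stm32" 5 7 hp (by decide) (by decide) (by decide) e6
      have b7 := sw_false_of_ne s "stm32g0" "g0" "stm32" 5 7 hp (by decide) (by decide) (by decide) e7
      have b8 := sw_false_of_ne s "stm32g4" "g4" "stm32" 5 7 hp (by decide) (by decide) (by decide) e8
      have b9 := sw_false_of_ne s "stm32h7" "h7" "stm32" 5 7 hp (by decide) (by decide) (by decide) e9
      have b10 := (sw_iff s "stm32l0" "l0" "stm32" 5 7 hp (by decide) (by decide) (by decide)).mpr e10
      simp only [loopA, patternsA, b1, b2, b3, b4, b5, b6, b7, b8, b9, b10, if_true, if_false, Bool.false_eq_true, treeB, hS, e10]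
      decide
    by_cases e11 : PySem.Str.slice s (some 5) (some 7) = "l1"
    · have b1 := sw_false_of_ne s "stm32f0" "f0" "stm32" 5 7 hp (by decide) (by decide) (by decide) e1
      have b2 := sw_false_of_ne s "stm32f1" "f1" "stm32" 5 7 hp (by decide) (by decide) (by decide) e2
      have b3 := sw_false_of_ne s "stm32f2" "f2" "stm32" 5 7 hp (by decide) (by decide) (by decide) e3
      have b4 := sw_false_of_ne s "stm32f3" "f3" "stm32" 5 7 hp (by decide) (by decide) (by decide) e4
      have b5 := sw_false_of_ne s "stm32f4" "f4" "stm32" 5 7 hp (by decide) (by decide) (by decide) e5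
      have b6 := sw_false_of_ne s "stm32f7" "f7" "stm32" 5 7 hp (by decide) (by decide) (by decide) e6
      have b7 := sw_false_of_ne s "stm32g0" "g0" "stm32" 5 7 hp (by decide) (by decide) (by decide) e7
      have b8 := sw_false_of_ne s "stm32g4" "g4" "stm32" 5 7 hp (by decide) (by decide) (by decide) e8
      have b9 := sw_false_of_ne s "stm32h7" "h7" "stm32" 5 7 hp (by decide) (by decide) (by decide) e9
      have b10 := sw_false_of_ne s "stm32l0" "l0" "stm32" 5 7 hp (by decide) (by decide) (by decide) e10
      have b11 := (sw_iff s "stm32l1" "l1" "stm32" 5 7 hp (by decide) (by decide) (by decide)).mpr e11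
      simp only [loopA, patternsA, b1, b2, b3, b4, b5, b6, b7, b8, b9, b10, b11, if_true, if_false, Bool.false_eq_true, treeB, hS, e11]
      decide
    by_cases e12 : PySem.Str.slice s (some 5) (some 7) = "l4"
    · have b1 := sw_false_of_ne s "stm32f0" "f0" "stm32" 5 7 hp (by decide) (by decide) (by decide) e1
      have b2 := sw_false_of_ne s "stm32f1" "f1" "stm32" 5 7 hp (by decide) (by decide) (by decide) e2
      have b3 := sw_false_of_ne s "stm32f2" "f2" "stm32" 5 7 hp (by decide) (by decide) (by decide) e3
      have b4 := sw_false_of_ne s "stm32f3" "f3" "stm32" 5 7 hp (by decide) (by decide) (by decide) e4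
      have b5 := sw_false_of_ne s "stm32f4" "f4" "stm32" 5 7 hp (by decide) (by decide) (by decide) e5
      have b6 := sw_false_of_ne s "stm32f7" "f7" "stm32" 5 7 hp (by decide) (by decide) (by decide) e6
      have b7 := sw_false_of_ne s "stm32g0" "g0" "stm32" 5 7 hp (by decide) (by decide) (by decide) e7
      have b8 := sw_false_of_ne s "stm32g4" "g4" "stm32" 5 7 hp (by decide) (by decide) (by decide) e8
      have b9 := sw_false_of_ne s "stm32h7" "h7" "stm32" 5 7 hp (by decide) (by decide) (by decide) e9
      have b10 := sw_false_of_ne s "stm32l0" "l0" "stm32" 5 7 hp (by decide) (by decide) (by decide) e10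
      have b11 := sw_false_of_ne s "stm32l1" "l1" "stm32" 5 7 hp (by decide) (by decide) (by decide) e11
      have b12 := (sw_iff s "stm32l4" "l4" "stm32" 5 7 hp (by decide) (by decide) (by decide)).mpr e12
      simp only [loopA, patternsA, b1, b2, b3, b4, b5, b6, b7, b8, b9, b10, b11, b12, if_true, if_false, Bool.false_eq_true, treeB, hS, e12]
      decide
    by_cases e13 : PySem.Str.slice s (some 5) (some 7) = "wb"
    · have b1 := sw_false_of_ne s "stm32f0" "f0" "stm32" 5 7 hp (by decide) (by decide) (by decide) e1
      have b2 := sw_false_of_ne s "stm32f1" "f1" "stm32" 5 7 hp (by decide) (by decide) (by decide) e2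
      have b3 := sw_false_of_ne s "stm32f2" "f2" "stm32" 5 7 hp (by decide) (by decide) (by decide) e3
      have b4 := sw_false_of_ne s "stm32f3" "f3" "stm32" 5 7 hp (by decide) (by decide) (by decide) e4
      have b5 := sw_false_of_ne s "stm32f4" "f4" "stm32" 5 7 hp (by decide) (by decide) (by decide) e5
      have b6 := sw_false_of_ne s "stm32f7" "f7" "stm32" 5 7 hp (by decide) (by decide) (by decide) e6
      have b7 := sw_false_of_ne s "stm32g0" "g0" "stm32" 5 7 hp (by decide) (by decide) (by decide) e7
      have b8 := sw_false_of_ne s "stm32g4" "g4" "stm32" 5 7 hp (by decide) (by decide) (by decide) e8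
      have b9 := sw_false_of_ne s "stm32h7" "h7" "stm32" 5 7 hp (by decide) (by decide) (by decide) e9
      have b10 := sw_false_of_ne s "stm32l0" "l0" "stm32" 5 7 hp (by decide) (by decide) (by decide) e10
      have b11 := sw_false_of_ne s "stm32l1" "l1" "stm32" 5 7 hp (by decide) (by decide) (by decide) e11
      have b12 := sw_false_of_ne s "stm32l4" "l4" "stm32" 5 7 hp (by decide) (by decide) (by decide) e12
      have b13 := (sw_iff s "stm32wb" "wb" "stm32" 5 7 hp (by decide) (by decide) (by decide)).mpr e13
      simp only [loopA, patternsA, b1, b2, b3, b4, b5, b6, b7, b8, b9, b10, b11, b12, b13, if_true, if_false, Bool.false_eq_true, treeB, hS, e13]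
      decide
    by_cases e14 : PySem.Str.slice s (some 5) (some 7) = "wl"
    · have b1 := sw_false_of_ne s "stm32f0" "f0" "stm32" 5 7 hp (by decide) (by decide) (by decide) e1
      have b2 := sw_false_of_ne s "stm32f1" "f1" "stm32" 5 7 hp (by decide) (by decide) (by decide) e2
      have b3 := sw_false_of_ne s "stm32f2" "f2" "stm32" 5 7 hp (by decide) (by decide) (by decide) e3
      have b4 := sw_false_of_ne s "stm32f3" "f3" "stm32" 5 7 hp (by decide) (by decide) (by decide) e4
      have b5 := sw_false_of_ne s "stm32f4" "f4" "stm32" 5 7 hp (by decide) (by decide) (by decide) e5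
      have b6 := sw_false_of_ne s "stm32f7" "f7" "stm32" 5 7 hp (by decide) (by decide) (by decide) e6
      have b7 := sw_false_of_ne s "stm32g0" "g0" "stm32" 5 7 hp (by decide) (by decide) (by decide) e7
      have b8 := sw_false_of_ne s "stm32g4" "g4" "stm32" 5 7 hp (by decide) (by decide) (by decide) e8
      have b9 := sw_false_of_ne s "stm32h7" "h7" "stm32" 5 7 hp (by decide) (by decide) (by decide) e9
      have b10 := sw_false_of_ne s "stm32l0" "l0" "stm32" 5 7 hp (by decide) (by decide) (by decide) e10
      have b11 := sw_false_of_ne s "stm32l1" "l1" "stm32" 5 7 hp (by decide) (by decide) (by decide) e11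
      have b12 := sw_false_of_ne s "stm32l4" "l4" "stm32" 5 7 hp (by decide) (by decide) (by decide) e12
      have b13 := sw_false_of_ne s "stm32wb" "wb" "stm32" 5 7 hp (by decide) (by decide) (by decide) e13
      have b14 := (sw_iff s "stm32wl" "wl" "stm32" 5 7 hp (by decide) (by decide) (by decide)).mpr e14
      simp only [loopA, patternsA, b1, b2, b3, b4, b5, b6, b7, b8, b9, b10, b11, b12, b13, b14, if_true, if_false, Bool.false_eq_true, treeB, hS, e14]
      decide
    have b1 := sw_false_of_ne s "stm32f0" "f0" "stm32" 5 7 hp (by decide) (by decide) (by decide) e1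
    have b2 := sw_false_of_ne s "stm32f1" "f1" "stm32" 5 7 hp (by decide) (by decide) (by decide) e2
    have b3 := sw_false_of_ne s "stm32f2" "f2" "stm32" 5 7 hp (by decide) (by decide) (by decide) e3
    have b4 := sw_false_of_ne s "stm32f3" "f3" "stm32" 5 7 hp (by decide) (by decide) (by decide) e4
    have b5 := sw_false_of_ne s "stm32f4" "f4" "stm32" 5 7 hp (by decide) (by decide) (by decide) e5
    have b6 := sw_false_of_ne s "stm32f7" "f7" "stm32" 5 7 hp (by decide) (by decide) (by decide) e6
    have b7 := sw_false_of_ne s "stm32g0" "g0" "stm32" 5 7 hp (by decide) (by decide) (by decide) e7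
    have b8 := sw_false_of_ne s "stm32g4" "g4" "stm32" 5 7 hp (by decide) (by decide) (by decide) e8
    have b9 := sw_false_of_ne s "stm32h7" "h7" "stm32" 5 7 hp (by decide) (by decide) (by decide) e9
    have b10 := sw_false_of_ne s "stm32l0" "l0" "stm32" 5 7 hp (by decide) (by decide) (by decide) e10
    have b11 := sw_false_of_ne s "stm32l1" "l1" "stm32" 5 7 hp (by decide) (by decide) (by decide) e11
    have b12 := sw_false_of_ne s "stm32l4" "l4" "stm32" 5 7 hp (by decide) (by decide) (by decide) e12
    have b13 := sw_false_of_ne s "stm32wb" "wb" "stm32" 5 7 hp (by decide) (by decide) (by decide) e13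
    have b14 := sw_false_of_ne s "stm32wl" "wl" "stm32" 5 7 hp (by decide) (by decide) (by decide) e14
    have b15 := sw_head_false s "stm32" "nrf51" hp (by decide) (by decide) (by decide)
    have b16 := sw_head_false s "stm32" "nrf52" hp (by decide) (by decide) (by decide)
    have b17 := sw_head_false s "stm32" "lpc17" hp (by decide) (by decide) (by decide)
    have b18 := sw_head_false s "stm32" "lpc54" hp (by decide) (by decide) (by decide)
    have hsetv : stm32xSeries = ["f0", "f1", "f2", "f3", "f4", "f7", "g0", "g4", "h7", "l4", "wb", "wl"] := by decide
    have hc : PySem.Set.contains stm32xSeries (PySem.Str.slice s (some 5) (some 7)) = false := by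
      rw [Bool.eq_false_iff]
      intro h
      have hm := (PySem.Set.contains_iff _ _).mp h
      simp [hsetv, e1, e2, e3, e4, e5, e6, e7, e8, e9, e12, e13, e14] at hm
    simp only [loopA, patternsA, b1, b2, b3, b4, b5, b6, b7, b8, b9, b10, b11, b12, b13, b14, b15, b16, b17, b18, if_false, Bool.false_eq_true, treeB, hS, hc, e10, e11, or_self, if_true]
  · have hS' : PySem.Str.startswith s "stm32" = false := Bool.eq_false_iff.mpr hS
    by_cases hN : PySem.Str.startswith s "nrf5" = true
    · have hpn : "nrf5".toList <+: s.toList := startswith_prefix hN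
      have b1 := sw_head_false s "nrf5" "stm32f0" hpn (by decide) (by decide) (by decide)
      have b2 := sw_head_false s "nrf5" "stm32f1" hpn (by decide) (by decide) (by decide)
      have b3 := sw_head_false s "nrf5" "stm32f2" hpn (by decide) (by decide) (by decide)
      have b4 := sw_head_false s "nrf5" "stm32f3" hpn (by decide) (by decide) (by decide)
      have b5 := sw_head_false s "nrf5" "stm32f4" hpn (by decide) (by decide) (by decide)
      have b6 := sw_head_false s "nrf5" "stm32f7" hpn (by decide) (by decide) (by decide)
      have b7 := sw_head_false s "nrf5" "stm32g0" hpn (by decide) (by decide) (by decide)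
      have b8 := sw_head_false s "nrf5" "stm32g4" hpn (by decide) (by decide) (by decide)
      have b9 := sw_head_false s "nrf5" "stm32h7" hpn (by decide) (by decide) (by decide)
      have b10 := sw_head_false s "nrf5" "stm32l0" hpn (by decide) (by decide) (by decide)
      have b11 := sw_head_false s "nrf5" "stm32l1" hpn (by decide) (by decide) (by decide)
      have b12 := sw_head_false s "nrf5" "stm32l4" hpn (by decide) (by decide) (by decide)
      have b13 := sw_head_false s "nrf5" "stm32wb" hpn (by decide) (by decide) (by decide)
      have b14 := sw_head_false s "nrf5" "stm32wl" hpn (by decide) (by decide) (by decide)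
      by_cases f1 : PySem.Str.slice s (some 4) (some 5) = "1"
      · have b15 := (sw_iff s "nrf51" "1" "nrf5" 4 5 hpn (by decide) (by decide) (by decide)).mpr f1
        simp only [loopA, patternsA, b1, b2, b3, b4, b5, b6, b7, b8, b9, b10, b11, b12, b13, b14, b15, if_true, if_false, Bool.false_eq_true, treeB, hS', hN, f1]
        decide
      by_cases f2 : PySem.Str.slice s (some 4) (some 5) = "2"
      · have b15 := sw_false_of_ne s "nrf51" "1" "nrf5" 4 5 hpn (by decide) (by decide) (by decide) f1
        have b16 := (sw_iff s "nrf52" "2" "nrf5" 4 5 hpn (by decide) (by decide) (by decide)).mpr f2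
        simp only [loopA, patternsA, b1, b2, b3, b4, b5, b6, b7, b8, b9, b10, b11, b12, b13, b14, b15, b16, if_true, if_false, Bool.false_eq_true, treeB, hS', hN, f2]
        decide
      have b15 := sw_false_of_ne s "nrf51" "1" "nrf5" 4 5 hpn (by decide) (by decide) (by decide) f1
      have b16 := sw_false_of_ne s "nrf52" "2" "nrf5" 4 5 hpn (by decide) (by decide) (by decide) f2
      have b17 := sw_head_false s "nrf5" "lpc17" hpn (by decide) (by decide) (by decide)
      have b18 := sw_head_false s "nrf5" "lpc54" hpn (by decide) (by decide) (by decide)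
      simp only [loopA, patternsA, b1, b2, b3, b4, b5, b6, b7, b8, b9, b10, b11, b12, b13, b14, b15, b16, b17, b18, if_false, Bool.false_eq_true, treeB, hS', hN, f1, f2, or_self, if_true]
    · have hN' : PySem.Str.startswith s "nrf5" = false := Bool.eq_false_iff.mpr hN
      by_cases hL : PySem.Str.startswith s "lpc" = true
      · have hpl : "lpc".toList <+: s.toList := startswith_prefix hL
        have b1 := sw_head_false s "lpc" "stm32f0" hpl (by decide) (by decide) (by decide)
        have b2 := sw_head_false s "lpc" "stm32f1" hpl (by decide) (by decide) (by decide)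
        have b3 := sw_head_false s "lpc" "stm32f2" hpl (by decide) (by decide) (by decide)
        have b4 := sw_head_false s "lpc" "stm32f3" hpl (by decide) (by decide) (by decide)
        have b5 := sw_head_false s "lpc" "stm32f4" hpl (by decide) (by decide) (by decide)
        have b6 := sw_head_false s "lpc" "stm32f7" hpl (by decide) (by decide) (by decide)
        have b7 := sw_head_false s "lpc" "stm32g0" hpl (by decide) (by decide) (by decide)
        have b8 := sw_head_false s "lpc" "stm32g4" hpl (by decide) (by decide) (by decide)
        have b9 := sw_head_false s "lpc" "stm32h7" hpl (by decide) (by decide) (by decide)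
        have b10 := sw_head_false s "lpc" "stm32l0" hpl (by decide) (by decide) (by decide)
        have b11 := sw_head_false s "lpc" "stm32l1" hpl (by decide) (by decide) (by decide)
        have b12 := sw_head_false s "lpc" "stm32l4" hpl (by decide) (by decide) (by decide)
        have b13 := sw_head_false s "lpc" "stm32wb" hpl (by decide) (by decide) (by decide)
        have b14 := sw_head_false s "lpc" "stm32wl" hpl (by decide) (by decide) (by decide)
        have b15 := sw_head_false s "lpc" "nrf51" hpl (by decide) (by decide) (by decide)
        have b16 := sw_head_false s "lpc" "nrf52" hpl (by decide) (by decide) (by decide)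
        by_cases g1 : PySem.Str.slice s (some 3) (some 5) = "17"
        · have b17 := (sw_iff s "lpc17" "17" "lpc" 3 5 hpl (by decide) (by decide) (by decide)).mpr g1
          simp only [loopA, patternsA, b1, b2, b3, b4, b5, b6, b7, b8, b9, b10, b11, b12, b13, b14, b15, b16, b17, if_true, if_false, Bool.false_eq_true, treeB, hS', hN', hL, g1, if_pos]
        by_cases g2 : PySem.Str.slice s (some 3) (some 5) = "54"
        · have b17 := sw_false_of_ne s "lpc17" "17" "lpc" 3 5 hpl (by decide) (by decide) (by decide) g1
          have b18 := (sw_iff s "lpc54" "54" "lpc" 3 5 hpl (by decide) (by decide) (by decide)).mpr g2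
          simp only [loopA, patternsA, b1, b2, b3, b4, b5, b6, b7, b8, b9, b10, b11, b12, b13, b14, b15, b16, b17, b18, if_true, if_false, Bool.false_eq_true, treeB, hS', hN', hL, g1, g2]
          decide
        have b17 := sw_false_of_ne s "lpc17" "17" "lpc" 3 5 hpl (by decide) (by decide) (by decide) g1
        have b18 := sw_false_of_ne s "lpc54" "54" "lpc" 3 5 hpl (by decide) (by decide) (by decide) g2
        simp only [loopA, patternsA, b1, b2, b3, b4, b5, b6, b7, b8, b9, b10, b11, b12, b13, b14, b15, b16, b17, b18, if_false, Bool.false_eq_true, treeB, hS', hN', hL, g1, g2, if_true]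
      · have hL' : PySem.Str.startswith s "lpc" = false := Bool.eq_false_iff.mpr hL
        have b1 := sw_ext_false s "stm32" "stm32f0" hS (by decide)
        have b2 := sw_ext_false s "stm32" "stm32f1" hS (by decide)
        have b3 := sw_ext_false s "stm32" "stm32f2" hS (by decide)
        have b4 := sw_ext_false s "stm32" "stm32f3" hS (by decide)
        have b5 := sw_ext_false s "stm32" "stm32f4" hS (by decide)
        have b6 := sw_ext_false s "stm32" "stm32f7" hS (by decide)
        have b7 := sw_ext_false s "stm32" "stm32g0" hS (by decide)
        have b8 := sw_ext_false s "stm32" "stm32g4" hS (by decide)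
        have b9 := sw_ext_false s "stm32" "stm32h7" hS (by decide)
        have b10 := sw_ext_false s "stm32" "stm32l0" hS (by decide)
        have b11 := sw_ext_false s "stm32" "stm32l1" hS (by decide)
        have b12 := sw_ext_false s "stm32" "stm32l4" hS (by decide)
        have b13 := sw_ext_false s "stm32" "stm32wb" hS (by decide)
        have b14 := sw_ext_false s "stm32" "stm32wl" hS (by decide)
        have b15 := sw_ext_false s "nrf5" "nrf51" hN (by decide)
        have b16 := sw_ext_false s "nrf5" "nrf52" hN (by decide)
        have b17 := sw_ext_false s "lpc" "lpc17" hL (by decide)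
        have b18 := sw_ext_false s "lpc" "lpc54" hL (by decide)
        simp only [loopA, patternsA, b1, b2, b3, b4, b5, b6, b7, b8, b9, b10, b11, b12, b13, b14, b15, b16, b17, b18, if_false, Bool.false_eq_true, treeB, hS', hN', hL']

-- ===== VERDICT (by name: the statement is the Claim_ definition above) =====
theorem infer_openocd_target_spec : Claim_equal_infer_openocd_target := by
  intro device _
  unfold Spec_infer_openocd_target infer_openocd_target infer_openocd_target_alt
  by_cases h : device = ""
  · simp [h]
  · simp only [h, if_false]
    exact core_eq _
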